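-- pv_equiv track=rewrite | github.com/octrow/stackpulse | analyze.py | _build_comprehensive_by_category
-- ===== SOURCE A (Python) =====
-- def _build_comprehensive_by_category(
--     skills_found: dict[str, list[str]],
--     llm_skills: dict[str, list[str]],
--     skills_catalog: dict[str, list[tuple[str, str]]],
-- ) -> dict[str, list[str]]:
--     """Merge regex hits with LLM skills into unified per-category dict.
--
--     Matched LLM terms (under '_matched' key) are routed to their catalog category
--     via reverse lookup. New discoveries are stored under their LLM-suggested category.
--     """
--     merged: dict[str, list[str]] = {
--         cat: list(hits) for cat, hits in skills_found.items()
--     }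
--
--     if not llm_skills:
--         return merged
--
--     # Build reverse index: display_term -> category
--     term_to_cat: dict[str, str] = {}
--     for cat, term_pairs in skills_catalog.items():
--         for display, _ in term_pairs:
--             term_to_cat.setdefault(display, cat)
--
--     for llm_cat, skills in llm_skills.items():
--         for skill in skills:
--             if llm_cat == "_matched":
--                 target_cat = term_to_cat.get(skill.lower())
--                 if target_cat is None:
--                     continue
--             else:
--                 target_cat = llm_cat
--             existing = merged.setdefault(target_cat, [])
--             if skill.lower() not in {s.lower() for s in existing}:
--                 existing.append(skill)
--
--     return merged
-- ===== SOURCE B (Python) =====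
-- def _build_comprehensive_by_category(
--     skills_found: dict[str, list[str]],
--     llm_skills: dict[str, list[str]],
--     skills_catalog: dict[str, list[tuple[str, str]]],
-- ) -> dict[str, list[str]]:
--     """Merge regex hits with LLM skills into unified per-category dict.
--
--     Staged pipeline instead of one threaded-dict loop: (1) resolve every LLM
--     skill to a (target_category, skill) pair by scanning the catalog directly,
--     dropping unroutable '_matched' terms; (2) group the routed skills per
--     target category; (3) compute the final category order; (4) build each
--     category's bucket independently from its regex hits plus its own group.
--     """
--     # Pass 1: route every LLM skill to a (target_category, skill) pair.
--     additions: list[tuple[str, str]] = []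
--     for llm_cat, skills in llm_skills.items():
--         for skill in skills:
--             if llm_cat != "_matched":
--                 additions.append((llm_cat, skill))
--             else:
--                 for cat, pairs in skills_catalog.items():
--                     if any(display == skill.lower() for display, _ in pairs):
--                         additions.append((cat, skill))
--                         break
--     # Pass 2: group the routed skills per target category.
--     grouped: dict[str, list[str]] = {}
--     for cat, skill in additions:
--         grouped[cat] = grouped.get(cat, []) + [skill]
--     # Pass 3: final category order (regex categories, then new targets by first appearance).
--     order = list(dict.fromkeys(list(skills_found) + [cat for cat, _ in additions]))
--     # Pass 4: each bucket is built on its own.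
--     return {
--         cat: _bucket(skills_found.get(cat, []), grouped.get(cat, []))
--         for cat in order
--     }
--
--
-- def _bucket(hits: list[str], new_skills: list[str]) -> list[str]:
--     bucket = list(hits)
--     for skill in new_skills:
--         if skill.lower() not in {s.lower() for s in bucket}:
--             bucket.append(skill)
--     return bucket
-- ===== Notes on version B (the rewrite author's own statement) =====
-- stated objective: alternative
-- what changed: Replaces A's single pass that threads one merged dict (precomputed reverse index, per-skill setdefault + dedup append) by a four-stage pipeline: resolve every LLM skill to a (category, skill) pair by scanning the catalog directly, group the routed skills per target category, compute the final category order by ordered dedup, then build each category's bucket independently.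
import Mathlib
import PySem

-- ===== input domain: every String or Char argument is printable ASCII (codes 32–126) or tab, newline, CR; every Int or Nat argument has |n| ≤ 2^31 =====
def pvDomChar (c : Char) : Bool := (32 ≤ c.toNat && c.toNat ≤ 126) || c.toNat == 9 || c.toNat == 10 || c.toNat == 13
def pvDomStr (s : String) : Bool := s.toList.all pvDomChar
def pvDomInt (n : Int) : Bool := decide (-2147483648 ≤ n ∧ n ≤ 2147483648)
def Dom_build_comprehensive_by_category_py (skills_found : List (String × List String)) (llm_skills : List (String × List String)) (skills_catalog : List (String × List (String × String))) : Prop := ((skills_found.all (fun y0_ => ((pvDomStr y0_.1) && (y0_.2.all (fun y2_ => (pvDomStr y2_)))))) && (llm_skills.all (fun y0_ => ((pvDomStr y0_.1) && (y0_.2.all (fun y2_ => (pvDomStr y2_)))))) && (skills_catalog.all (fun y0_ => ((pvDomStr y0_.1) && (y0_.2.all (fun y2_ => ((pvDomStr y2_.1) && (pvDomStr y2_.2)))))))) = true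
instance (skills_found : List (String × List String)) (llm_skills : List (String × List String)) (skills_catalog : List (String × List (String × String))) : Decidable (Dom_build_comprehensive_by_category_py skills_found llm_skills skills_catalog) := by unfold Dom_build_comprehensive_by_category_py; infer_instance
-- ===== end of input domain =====

-- B replaces A's single pass threading one merged dict (reverse index + per-skill setdefault/dedup)
-- by a three-stage pipeline: resolve all LLM skills to (category, skill) pairs by direct catalog
-- scans, compute the final category order, then build each category's bucket independently.

-- ===== PORT A =====
def build_comprehensive_by_category_py (skills_found : List (String × List String)) (llm_skills : List (String × List String)) (skills_catalog : List (String × List (String × String))) : List (String × List String) :=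
  -- merged = {cat: list(hits) for cat, hits in skills_found.items()}
  let merged : PySem.Dict String (List String) :=
    skills_found.foldl (fun d p => d.insert p.1 p.2) PySem.Dict.empty
  if llm_skills = [] then merged.items
  else
    -- reverse index: term_to_cat.setdefault(display, cat) for every (display, _) pair
    let term_to_cat : PySem.Dict String String :=
      skills_catalog.foldl (fun d e => e.2.foldl (fun d p => d.setdefault p.1 e.1) d) PySem.Dict.empty
    let final : PySem.Dict String (List String) :=
      llm_skills.foldl (fun m e =>
        e.2.foldl (fun m skill =>
          let target? : Option String :=
            if e.1 == "_matched" then term_to_cat.get? (PySem.Str.lower skill)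
            else some e.1
          match target? with
          | none => m
          | some target =>
            let m1 := m.setdefault target []
            let existing := m1.getD target []
            if (PySem.Str.lower skill) ∈ PySem.Set.ofList (existing.map PySem.Str.lower) then m1
            else m1.modify target [] (· ++ [skill])) m) merged
    final.items

-- ===== PORT B =====
-- helper _bucket(hits, new_skills)
def pvBucket (hits : List String) (new_skills : List String) : List String :=
  new_skills.foldl (fun b s =>
    if (PySem.Str.lower s) ∈ PySem.Set.ofList (b.map PySem.Str.lower) then b
    else b ++ [s]) hits

def build_comprehensive_by_category_py_alt (skills_found : List (String × List String)) (llm_skills : List (String × List String)) (skills_catalog : List (String × List (String × String))) : List (String × List String) :=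
  -- Pass 1: additions = routed (target_cat, skill) pairs; the for/break catalog scan is List.find?
  let additions : List (String × String) :=
    llm_skills.foldl (fun acc e =>
      e.2.foldl (fun acc skill =>
        if e.1 != "_matched" then acc ++ [(e.1, skill)]
        else
          match skills_catalog.find? (fun c => c.2.any (fun p => p.1 == PySem.Str.lower skill)) with
          | some c => acc ++ [(c.1, skill)]
          | none => acc) acc) []
  -- Pass 2: grouped[cat] = grouped.get(cat, []) + [skill]  (= Dict.modify)
  let grouped : PySem.Dict String (List String) :=
    additions.foldl (fun d p => d.modify p.1 [] (· ++ [p.2])) PySem.Dict.empty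
  -- the skills_found dict (list(skills_found) = keys, .get(cat, []) = getD)
  let found : PySem.Dict String (List String) :=
    skills_found.foldl (fun d p => d.insert p.1 p.2) PySem.Dict.empty
  -- Pass 3: order = list(dict.fromkeys(list(skills_found) + [cat for cat, _ in additions]))
  let order : List String := PySem.List.dedup (found.keys ++ additions.map (·.1))
  -- Pass 4: {cat: _bucket(skills_found.get(cat, []), grouped.get(cat, [])) for cat in order}
  (order.foldl (fun r c => r.insert c (pvBucket (found.getD c []) (grouped.getD c []))) PySem.Dict.empty).items

-- ===== PRECONDITION & SPEC =====
def Spec_build_comprehensive_by_category_py (skills_found : List (String × List String)) (llm_skills : List (String × List String)) (skills_catalog : List (String × List (String × String))) (out : List (String × List String)) : Prop := out = build_comprehensive_by_category_py_alt skills_found llm_skills skills_catalog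
instance (skills_found : List (String × List String)) (llm_skills : List (String × List String)) (skills_catalog : List (String × List (String × String))) (out : List (String × List String)) : Decidable (Spec_build_comprehensive_by_category_py skills_found llm_skills skills_catalog out) := by unfold Spec_build_comprehensive_by_category_py; infer_instance

-- ===== CLAIM (what is proved, stated in full; the proofs are below) =====
def Claim_equal_build_comprehensive_by_category_py : Prop := ∀ (skills_found : List (String × List String)) (llm_skills : List (String × List String)) (skills_catalog : List (String × List (String × String))), Dom_build_comprehensive_by_category_py skills_found llm_skills skills_catalog → Spec_build_comprehensive_by_category_py skills_found llm_skills skills_catalog (build_comprehensive_by_category_py skills_found llm_skills skills_catalog)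

-- ===== LEMMAS AND PROOFS =====

-- A's per-skill body, with the reverse index inlined (defeq to the lambda in port A)
def pvStepA (catalog : List (String × List (String × String))) (llmcat : String)
    (m : PySem.Dict String (List String)) (skill : String) : PySem.Dict String (List String) :=
  let target? : Option String :=
    if llmcat == "_matched" then
      (catalog.foldl (fun d e => e.2.foldl (fun d p => d.setdefault p.1 e.1) d)
        PySem.Dict.empty).get? (PySem.Str.lower skill)
    else some llmcat
  match target? with
  | none => m
  | some target =>
    let m1 := m.setdefault target []
    let existing := m1.getD target []
    if (PySem.Str.lower skill) ∈ PySem.Set.ofList (existing.map PySem.Str.lower) then m1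
    else m1.modify target [] (· ++ [skill])

-- B's per-skill additions step (defeq to the lambda in port B)
def pvAddStep (catalog : List (String × List (String × String))) (llmcat : String)
    (acc : List (String × String)) (skill : String) : List (String × String) :=
  if llmcat != "_matched" then acc ++ [(llmcat, skill)]
  else
    match catalog.find? (fun c => c.2.any (fun p => p.1 == PySem.Str.lower skill)) with
    | some c => acc ++ [(c.1, skill)]
    | none => acc

-- routing of one skill, shared shape of both programs
def pvResolve (catalog : List (String × List (String × String))) (llmcat skill : String) : Option (String × String) :=
  if llmcat == "_matched" then
    (catalog.find? (fun c => c.2.any (fun p => p.1 == PySem.Str.lower skill))).map (fun c => (c.1, skill))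
  else some (llmcat, skill)

-- A's per-addition dict update
def pvStepAdd (m : PySem.Dict String (List String)) (p : String × String) : PySem.Dict String (List String) :=
  let m1 := m.setdefault p.1 []
  if (PySem.Str.lower p.2) ∈ PySem.Set.ofList ((m1.getD p.1 []).map PySem.Str.lower) then m1
  else m1.modify p.1 [] (· ++ [p.2])

-- the order-building step (Set.add on the pair's category)
def pvOrderStep (ord : List String) (p : String × String) : List String :=
  if ord.contains p.1 then ord else ord ++ [p.1]

-- A's bucket update for one category, folded over ALL additions
def pvBucketAll (hits : List String) (cat : String) (additions : List (String × String)) : List String :=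
  additions.foldl (fun b p =>
    if p.1 == cat then
      if (PySem.Str.lower p.2) ∈ PySem.Set.ofList (b.map PySem.Str.lower) then b
      else b ++ [p.2]
    else b) hits

-- the resolved additions of the whole llm dict
def pvAdds (catalog : List (String × List (String × String))) (lls : List (String × List String)) : List (String × String) :=
  lls.flatMap (fun e => e.2.filterMap (pvResolve catalog e.1))

-- setdefault fold over one category's pairs: first-wins lookup
theorem get?_setdefault_pairs (pairs : List (String × String)) (cat k : String)
    (d : PySem.Dict String String) :
    (pairs.foldl (fun d p => d.setdefault p.1 cat) d).get? k
      = (d.get? k).or (if pairs.any (fun p => p.1 == k) then some cat else none) := by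
  induction pairs generalizing d with
  | nil => simp
  | cons p rest ih =>
    simp only [List.foldl_cons, ih]
    by_cases h : k = p.1
    · rw [h, PySem.Dict.get?_setdefault_self]
      simp only [List.any_cons, beq_self_eq_true, Bool.true_or, if_true]
      cases d.get? p.1 <;> simp
    · rw [PySem.Dict.get?_setdefault_of_ne d cat h]
      have hpk : (p.1 == k) = false := by simpa using Ne.symm h
      simp only [List.any_cons, hpk, Bool.false_or]

-- A's whole reverse index equals the first-match scan of the catalog
theorem get?_term_to_cat (catalog : List (String × List (String × String))) (k : String)
    (d : PySem.Dict String String) :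
    (catalog.foldl (fun d e => e.2.foldl (fun d p => d.setdefault p.1 e.1) d) d).get? k
      = (d.get? k).or ((catalog.find? (fun c => c.2.any (fun p => p.1 == k))).map (·.1)) := by
  induction catalog generalizing d with
  | nil => simp
  | cons e rest ih =>
    simp only [List.foldl_cons, ih, get?_setdefault_pairs]
    by_cases h : e.2.any (fun p => p.1 == k) = true
    · simp only [List.find?_cons, h, if_true, Option.map_some]
      cases d.get? k <;> simp
    · simp only [Bool.not_eq_true] at h
      simp [h]

-- A's per-skill body equals routing by pvResolve then pvStepAdd
theorem stepA_eq (catalog : List (String × List (String × String))) (llmcat s : String)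
    (m : PySem.Dict String (List String)) :
    pvStepA catalog llmcat m s
      = match pvResolve catalog llmcat s with
        | none => m
        | some p => pvStepAdd m p := by
  unfold pvStepA pvResolve pvStepAdd
  by_cases hc : (llmcat == "_matched") = true
  · simp only [hc, if_true, get?_term_to_cat, PySem.Dict.get?_empty, Option.none_or]
    cases catalog.find? (fun c => c.2.any (fun p => p.1 == PySem.Str.lower s)) with
    | none => rfl
    | some c => rfl
  · simp only [hc, Bool.false_eq_true, if_false]

-- A's inner skill loop is a fold of pvStepAdd over the resolved pairs
theorem inner_loop_A (catalog : List (String × List (String × String))) (llmcat : String)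
    (sk : List String) (m : PySem.Dict String (List String)) :
    sk.foldl (pvStepA catalog llmcat) m
      = (sk.filterMap (pvResolve catalog llmcat)).foldl pvStepAdd m := by
  induction sk generalizing m with
  | nil => rfl
  | cons s rest ih =>
    simp only [List.foldl_cons]
    rw [stepA_eq]
    cases hres : pvResolve catalog llmcat s with
    | none => simp only [List.filterMap_cons, hres]; exact ih m
    | some p => simp only [List.filterMap_cons, hres, List.foldl_cons]; exact ih (pvStepAdd m p)

-- A's whole merge loop is one fold of pvStepAdd over pvAdds
theorem main_loop_A (catalog : List (String × List (String × String)))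
    (lls : List (String × List String)) (m : PySem.Dict String (List String)) :
    lls.foldl (fun m e => e.2.foldl (pvStepA catalog e.1) m) m
      = (pvAdds catalog lls).foldl pvStepAdd m := by
  induction lls generalizing m with
  | nil => rfl
  | cons e rest ih =>
    simp only [List.foldl_cons, pvAdds, List.flatMap_cons, List.foldl_append]
    rw [inner_loop_A, ih]
    rfl

-- B's pass 1 computes exactly pvAdds
theorem additions_inner (catalog : List (String × List (String × String))) (llmcat : String)
    (sk : List String) (acc : List (String × String)) :
    sk.foldl (pvAddStep catalog llmcat) acc = acc ++ sk.filterMap (pvResolve catalog llmcat) := by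
  induction sk generalizing acc with
  | nil => simp
  | cons s rest ih =>
    simp only [List.foldl_cons, List.filterMap_cons, ih]
    unfold pvAddStep pvResolve
    by_cases hc : (llmcat == "_matched") = true
    · simp only [hc, bne, Bool.not_true, Bool.false_eq_true, if_false, if_true]
      cases catalog.find? (fun c => c.2.any (fun p => p.1 == PySem.Str.lower s)) with
      | none => simp
      | some c => simp
    · simp only [hc, bne, Bool.not_eq_true'] at *
      simp [List.append_assoc]

theorem additions_eq (catalog : List (String × List (String × String)))
    (lls : List (String × List String)) (acc : List (String × String)) :
    lls.foldl (fun acc e => e.2.foldl (pvAddStep catalog e.1) acc) acc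
      = acc ++ pvAdds catalog lls := by
  induction lls generalizing acc with
  | nil => simp [pvAdds]
  | cons e rest ih =>
    simp only [List.foldl_cons, pvAdds, List.flatMap_cons]
    rw [additions_inner, ih, List.append_assoc]
    rfl

-- B's bucket over the grouped skills equals A's bucket fold over all additions
theorem bucketAll_eq (hits : List String) (c : String) (adds : List (String × String)) :
    pvBucketAll hits c adds
      = pvBucket hits ((adds.filter (fun p => p.1 == c)).map (fun x => x.2)) := by
  unfold pvBucketAll pvBucket
  rw [List.foldl_map,
    ← PySem.List.foldl_if_eq_foldl_filter (fun p => p.1 == c)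
      (fun b (p : String × String) =>
        if (PySem.Str.lower p.2) ∈ PySem.Set.ofList (b.map PySem.Str.lower) then b
        else b ++ [p.2])]

-- B's dedup order equals the Set.add fold over the additions' categories
theorem order_eq (adds : List (String × String)) (ks : List String) (h : ks.Nodup) :
    PySem.List.dedup (ks ++ adds.map (fun p => p.1)) = adds.foldl pvOrderStep ks := by
  rw [PySem.List.dedup_eq_ofList, PySem.Set.ofList_append,
    PySem.Set.ofList_eq_self_of_nodup ks h, PySem.Set.update_map_eq_foldl_add]
  rfl

-- one pvStepAdd step: how keys move
theorem keys_pvStepAdd (m : PySem.Dict String (List String)) (p : String × String) :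
    (pvStepAdd m p).keys = pvOrderStep m.keys p := by
  unfold pvStepAdd pvOrderStep
  by_cases hc : m.contains p.1 = true
  · have hmem : m.keys.contains p.1 = true :=
      List.contains_iff_mem.mpr ((PySem.Dict.contains_iff_mem_keys m p.1).mp hc)
    rw [PySem.Dict.setdefault_of_contains m _ hc]
    simp only [hmem, if_true]
    split
    · rfl
    · rw [PySem.Dict.keys_modify, PySem.Dict.keys_insert_of_contains m _ hc]
  · have hc' : m.contains p.1 = false := by simpa using hc
    have hmem : m.keys.contains p.1 = false := by
      rw [Bool.eq_false_iff]
      intro h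
      exact hc ((PySem.Dict.contains_iff_mem_keys m p.1).mpr (List.contains_iff_mem.mp h))
    rw [PySem.Dict.setdefault_of_not_contains m _ hc']
    simp only [hmem, Bool.false_eq_true, if_false]
    split
    · exact PySem.Dict.keys_insert_of_not_contains m _ hc'
    · rw [PySem.Dict.keys_modify,
        PySem.Dict.keys_insert_of_contains _ _ (PySem.Dict.contains_insert_self m p.1 []),
        PySem.Dict.keys_insert_of_not_contains m _ hc']

-- one pvStepAdd step: how a bucket moves
theorem getD_pvStepAdd (m : PySem.Dict String (List String)) (p : String × String) (c : String) :
    (pvStepAdd m p).getD c []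
      = if p.1 == c then
          (if (PySem.Str.lower p.2) ∈ PySem.Set.ofList ((m.getD c []).map PySem.Str.lower)
           then m.getD c [] else m.getD c [] ++ [p.2])
        else m.getD c [] := by
  unfold pvStepAdd
  by_cases hpc : p.1 = c
  · subst hpc
    have h1 : (m.setdefault p.1 []).getD p.1 [] = m.getD p.1 [] :=
      PySem.Dict.getD_setdefault_self m p.1 [] []
    simp only [beq_self_eq_true, if_true, h1]
    split
    · exact h1
    · rw [PySem.Dict.getD_modify_self, h1]
  · have hbe : (p.1 == c) = false := by simpa using hpc
    have h1 : (m.setdefault p.1 []).getD c [] = m.getD c [] := by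
      rw [PySem.Dict.getD_eq_get?_getD, PySem.Dict.get?_setdefault_of_ne _ _ (Ne.symm hpc),
        ← PySem.Dict.getD_eq_get?_getD]
    simp only [hbe, Bool.false_eq_true, if_false]
    split
    · exact h1
    · rw [PySem.Dict.getD_modify_of_ne _ [] _ (Ne.symm hpc)]
      exact h1

-- keys of pvStepAdd stay Nodup
theorem nodup_keys_pvStepAdd (m : PySem.Dict String (List String)) (p : String × String)
    (h : m.keys.Nodup) : (pvStepAdd m p).keys.Nodup := by
  rw [keys_pvStepAdd]
  unfold pvOrderStep
  split
  · exact h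
  · rename_i hnc
    refine List.Nodup.append h (List.nodup_singleton _) ?_
    intro a ha hb
    simp only [List.mem_singleton] at hb
    subst hb
    exact absurd (List.contains_iff_mem.mpr ha) (by simpa using hnc)

-- the order fold keeps Nodup
theorem nodup_order_fold (adds : List (String × String)) (ks : List String) (h : ks.Nodup) :
    (adds.foldl pvOrderStep ks).Nodup := by
  induction adds generalizing ks with
  | nil => exact h
  | cons p rest ih =>
    simp only [List.foldl_cons]
    apply ih
    unfold pvOrderStep
    split
    · exact h
    · rename_i hnc
      refine List.Nodup.append h (List.nodup_singleton _) ?_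
      intro a ha hb
      simp only [List.mem_singleton] at hb
      subst hb
      exact absurd (List.contains_iff_mem.mpr ha) (by simpa using hnc)

-- CORE: the threaded-dict fold equals the per-category group-by
theorem fold_eq_groupby (adds : List (String × String)) (m : PySem.Dict String (List String))
    (h : m.keys.Nodup) :
    (adds.foldl pvStepAdd m).items
      = (adds.foldl pvOrderStep m.keys).map (fun c => (c, pvBucketAll (m.getD c []) c adds)) := by
  induction adds generalizing m with
  | nil =>
    simpa [pvBucketAll] using PySem.Dict.items_eq_map_keys m h []
  | cons p rest ih =>
    simp only [List.foldl_cons]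
    rw [ih (pvStepAdd m p) (nodup_keys_pvStepAdd m p h), keys_pvStepAdd]
    apply List.map_congr_left
    intro c _
    congr 1
    unfold pvBucketAll
    simp only [List.foldl_cons]
    rw [getD_pvStepAdd]

-- found dict has Nodup keys
theorem nodup_keys_found (sf : List (String × List String)) :
    (sf.foldl (fun d p => d.insert p.1 p.2) (PySem.Dict.empty : PySem.Dict String (List String))).keys.Nodup := by
  exact PySem.Dict.nodup_keys_foldl_insert_key sf (fun p => p.1) (fun _ p => p.2)
    PySem.Dict.empty (by simp)

-- ===== VERDICT (by name: the statement is the Claim_ definition above) =====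
theorem build_comprehensive_by_category_py_spec : Claim_equal_build_comprehensive_by_category_py := by
  intro sf lls cat _
  unfold Spec_build_comprehensive_by_category_py
  show (if lls = [] then
          (sf.foldl (fun d p => d.insert p.1 p.2) (PySem.Dict.empty : PySem.Dict String (List String))).items
        else
          (lls.foldl (fun (m : PySem.Dict String (List String)) (e : String × List String) => e.2.foldl (pvStepA cat e.1) m)
            (sf.foldl (fun d p => d.insert p.1 p.2) PySem.Dict.empty)).items)
      = (List.foldl
            (fun (r : PySem.Dict String (List String)) (c : String) =>
              r.insert c
                (pvBucket ((sf.foldl (fun d p => d.insert p.1 p.2) PySem.Dict.empty).getD c [])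
                  (((lls.foldl (fun (acc : List (String × String)) (e : String × List String) => e.2.foldl (pvAddStep cat e.1) acc) []).foldl
                      (fun (d : PySem.Dict String (List String)) (p : String × String) => d.modify p.1 [] (· ++ [p.2]))
                      PySem.Dict.empty).getD c [])))
            PySem.Dict.empty
            (PySem.List.dedup
              ((sf.foldl (fun d p => d.insert p.1 p.2) (PySem.Dict.empty : PySem.Dict String (List String))).keys
                ++ (lls.foldl (fun (acc : List (String × String)) (e : String × List String) => e.2.foldl (pvAddStep cat e.1) acc) []).map (fun p => p.1)))).items
  rw [additions_eq]
  simp only [List.nil_append]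
  set found := sf.foldl (fun d p => d.insert p.1 p.2) (PySem.Dict.empty : PySem.Dict String (List String)) with hfound
  have hnd : found.keys.Nodup := nodup_keys_found sf
  have hV : (fun (r : PySem.Dict String (List String)) (c : String) =>
        r.insert c
          (pvBucket (found.getD c [])
            (((pvAdds cat lls).foldl
                (fun (d : PySem.Dict String (List String)) (p : String × String) => d.modify p.1 [] (· ++ [p.2]))
                PySem.Dict.empty).getD c [])))
      = (fun (r : PySem.Dict String (List String)) (c : String) =>
          r.insert c (pvBucketAll (found.getD c []) c (pvAdds cat lls))) := by
    funext r c
    rw [PySem.Dict.getD_foldl_modify_append, PySem.Dict.getD_empty, List.nil_append, ← bucketAll_eq]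
  rw [hV, order_eq _ _ hnd]
  have hB :
      (((pvAdds cat lls).foldl pvOrderStep found.keys).foldl
          (fun r c => r.insert c (pvBucketAll (found.getD c []) c (pvAdds cat lls)))
          (PySem.Dict.empty : PySem.Dict String (List String))).items
        = ((pvAdds cat lls).foldl pvOrderStep found.keys).map
            (fun c => (c, pvBucketAll (found.getD c []) c (pvAdds cat lls))) := by
    rw [PySem.Dict.items_foldl_insert_fresh
      ((pvAdds cat lls).foldl pvOrderStep found.keys)
      (fun c => c) (fun c => pvBucketAll (found.getD c []) c (pvAdds cat lls))
      PySem.Dict.empty (by intro a _; simp) (by simpa using nodup_order_fold _ _ hnd)]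
    rfl
  rw [hB]
  by_cases hll : lls = []
  · subst hll
    rw [if_pos rfl]
    show found.items
      = ((pvAdds cat []).foldl pvOrderStep found.keys).map
          (fun c => (c, pvBucketAll (found.getD c []) c (pvAdds cat [])))
    simpa [pvAdds, pvBucketAll] using PySem.Dict.items_eq_map_keys found hnd []
  · rw [if_neg hll, main_loop_A]
    exact fold_eq_groupby (pvAdds cat lls) found hnd
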